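-- pv_equiv track=rewrite | github.com/diekotto/codember-2024 | 01/01.py | solve_lock
-- ===== SOURCE A (Python) =====
-- def solve_lock(initial_number: str, movements: str) -> str:
--     # Convertimos el número inicial a una lista de dígitos
--     digits = [int(d) for d in str(initial_number)]
--     current_position = 0
--
--     for move in movements:
--         if move == 'R':
--             # Mover a la derecha, volver al inicio si llegamos al final
--             current_position = (current_position + 1) % len(digits)
--         elif move == 'L':
--             # Mover a la izquierda, ir al final si estamos al inicio
--             current_position = (current_position - 1) % len(digits)
--         elif move == 'U':
--             # Incrementar dígito, volver a 0 si es 9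
--             digits[current_position] = (digits[current_position] + 1) % 10
--         elif move == 'D':
--             # Decrementar dígito, ir a 9 si es 0
--             digits[current_position] = (digits[current_position] - 1) % 10
--
--     # Convertir la lista de dígitos de vuelta a string
--     return ''.join(map(str, digits))
-- ===== SOURCE B (Python) =====
-- def solve_lock(initial_number: str, movements: str) -> str:
--     # Staged pipeline: pass 1 records the (closed-form) R/L prefix sum before each move,
--     # pass 2 tallies U/D into a per-position delta table, pass 3 applies deltas mod 10.
--     digits = [int(d) for d in str(initial_number)]
--     n = len(digits)
--     steps = {'R': 1, 'L': -1}
--     positions = []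
--     rl = 0
--     for m in movements:
--         positions.append(rl)
--         rl += steps.get(m, 0)
--     deltas = [0] * n
--     for p, m in zip(positions, movements):
--         if m == 'U':
--             deltas[p % n] += 1
--         elif m == 'D':
--             deltas[p % n] -= 1
--     return ''.join(str((d + t) % 10) for d, t in zip(digits, deltas))
-- ===== Notes on version B (the rewrite author's own statement) =====
-- stated objective: alternative
-- what changed: B replaces A's single stateful four-branch interpreter by a staged pipeline: pass 1 records the R/L prefix sum (the closed-form position) before each move, pass 2 zips those positions with the moves and tallies U/D into a per-position delta table, and a final pass applies each net delta mod 10 to the original digits; digits are never touched during the walk.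
import Mathlib
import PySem

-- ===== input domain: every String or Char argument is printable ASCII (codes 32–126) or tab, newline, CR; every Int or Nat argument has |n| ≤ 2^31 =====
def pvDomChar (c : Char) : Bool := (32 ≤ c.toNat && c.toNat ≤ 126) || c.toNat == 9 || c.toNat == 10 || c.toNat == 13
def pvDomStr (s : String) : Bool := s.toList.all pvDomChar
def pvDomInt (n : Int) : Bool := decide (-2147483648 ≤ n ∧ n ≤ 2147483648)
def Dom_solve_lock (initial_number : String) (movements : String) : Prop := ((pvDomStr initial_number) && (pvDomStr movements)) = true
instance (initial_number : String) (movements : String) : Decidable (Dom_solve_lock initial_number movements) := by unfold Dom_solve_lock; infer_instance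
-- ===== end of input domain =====

-- B replaces A's stateful four-branch interpreter by a staged pipeline: record the R/L prefix
-- sum before each move, tally U/D into a per-position delta table, then apply deltas mod 10; same cost.

-- shared by both ports: [int(d) for d in str(initial_number)]
-- (.getD 0 is never reached inside Pre_, which requires every character to be a digit)
def pvDigitsOf (s : String) : List Int :=
  s.toList.map (fun d => (PySem.Int.ofChars? [d]).getD 0)

-- ===== PORT A =====
def solveLockStepA (st : List Int × Int) (c : Char) : List Int × Int :=
  if c = 'R' then (st.1, PySem.Int.mod (st.2 + 1) (st.1.length : Int))
  else if c = 'L' then (st.1, PySem.Int.mod (st.2 - 1) (st.1.length : Int))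
  else if c = 'U' then
    (PySem.List.pySetD st.1 st.2 (PySem.Int.mod (PySem.List.pyGetD st.1 st.2 0 + 1) 10), st.2)
  else if c = 'D' then
    (PySem.List.pySetD st.1 st.2 (PySem.Int.mod (PySem.List.pyGetD st.1 st.2 0 - 1) 10), st.2)
  else st

def solve_lock (initial_number : String) (movements : String) : String :=
  let digits := pvDigitsOf initial_number
  let st := movements.toList.foldl solveLockStepA (digits, 0)
  PySem.Str.join "" (st.1.map PySem.Int.toStr)

-- ===== PORT B =====
-- steps = {'R': 1, 'L': -1}
def pvSteps : PySem.Dict Char Int := PySem.Dict.ofList [('R', 1), ('L', -1)]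

-- pass 1 body: positions.append(rl); rl += steps.get(m, 0)
def solveLockPass1 (st : List Int × Int) (m : Char) : List Int × Int :=
  (st.1 ++ [st.2], st.2 + pvSteps.getD m 0)

-- pass 2 body: if m == 'U': deltas[p % n] += 1  elif m == 'D': deltas[p % n] -= 1
def solveLockPass2 (n : Int) (deltas : List Int) (pm : Int × Char) : List Int :=
  if pm.2 = 'U' then
    PySem.List.pySetD deltas (PySem.Int.mod pm.1 n)
      (PySem.List.pyGetD deltas (PySem.Int.mod pm.1 n) 0 + 1)
  else if pm.2 = 'D' then
    PySem.List.pySetD deltas (PySem.Int.mod pm.1 n)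
      (PySem.List.pyGetD deltas (PySem.Int.mod pm.1 n) 0 - 1)
  else deltas

def solve_lock_alt (initial_number : String) (movements : String) : String :=
  let digits := pvDigitsOf initial_number
  let n : Int := digits.length
  let positions := (movements.toList.foldl solveLockPass1 ([], 0)).1
  let deltas := (positions.zip movements.toList).foldl (solveLockPass2 n)
    (List.replicate digits.length 0)
  PySem.Str.join "" ((digits.zip deltas).map
    (fun p => PySem.Int.toStr (PySem.Int.mod (p.1 + p.2) 10)))

-- ===== PRECONDITION & SPEC =====
-- Pre_ excludes exactly the inputs where the Python A raises: a non-digit character in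
-- initial_number (int() ValueError), and an empty initial_number combined with any R/L/U/D move
-- (ZeroDivisionError on R/L, IndexError on U/D).
def Pre_solve_lock (initial_number : String) (movements : String) : Prop :=
  (initial_number.toList.all (fun c => 48 ≤ c.toNat && c.toNat ≤ 57) = true) ∧
  (initial_number ≠ "" ∨
    movements.toList.all (fun c => !(c == 'R') && !(c == 'L') && !(c == 'U') && !(c == 'D')) = true)
instance (initial_number : String) (movements : String) : Decidable (Pre_solve_lock initial_number movements) := by
  unfold Pre_solve_lock; infer_instance
def pvWitness_solve_lock : String × String := ("1024", "RUULDDR")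

def Spec_solve_lock (initial_number : String) (movements : String) (out : String) : Prop := out = solve_lock_alt initial_number movements
instance (initial_number : String) (movements : String) (out : String) : Decidable (Spec_solve_lock initial_number movements out) := by unfold Spec_solve_lock; infer_instance

-- ===== CLAIM (what is proved, stated in full; the proofs are below) =====
def Claim_equal_solve_lock : Prop := ∀ (initial_number : String) (movements : String), Dom_solve_lock initial_number movements → Pre_solve_lock initial_number movements → Spec_solve_lock initial_number movements (solve_lock initial_number movements)

-- ===== LEMMAS AND PROOFS =====

-- the list of R/L prefix sums that B's pass 1 produces
def pList (rl : Int) : List Char → List Int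
  | [] => []
  | m :: ms => rl :: pList (rl + pvSteps.getD m 0) ms

lemma pass1_fst : ∀ (ms : List Char) (acc : List Int) (rl : Int),
    (ms.foldl solveLockPass1 (acc, rl)).1 = acc ++ pList rl ms := by
  intro ms
  induction ms with
  | nil => intro acc rl; simp [pList]
  | cons m ms ih =>
    intro acc rl
    simp only [List.foldl_cons, solveLockPass1, pList]
    rw [ih]
    simp

-- pass 1 then pass 2 equals one fused stateful fold
def fusedStep (n : Int) (st : List Int × Int) (m : Char) : List Int × Int :=
  (solveLockPass2 n st.1 (st.2, m), st.2 + pvSteps.getD m 0)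

lemma fuse (n : Int) : ∀ (ms : List Char) (deltas : List Int) (rl : Int),
    ((pList rl ms).zip ms).foldl (solveLockPass2 n) deltas
      = (ms.foldl (fusedStep n) (deltas, rl)).1 := by
  intro ms
  induction ms with
  | nil => intro deltas rl; rfl
  | cons m ms ih =>
    intro deltas rl
    simp only [pList, List.zip_cons_cons, List.foldl_cons]
    exact ih _ _

-- A's digit list, reconstructed from the original digits and B's delta table
def applyZ (ds δs : List Int) : List Int :=
  (ds.zip δs).map (fun p => PySem.Int.mod (p.1 + p.2) 10)

lemma applyZ_length (ds δs : List Int) (h : δs.length = ds.length) :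
    (applyZ ds δs).length = ds.length := by
  simp [applyZ, h]

lemma mod_mod_add (a b n : Int) (hn : 0 < n) :
    PySem.Int.mod (PySem.Int.mod a n + b) n = PySem.Int.mod (a + b) n := by
  rw [PySem.Int.mod_eq_emod_of_pos hn, PySem.Int.mod_eq_emod_of_pos hn,
    PySem.Int.mod_eq_emod_of_pos hn, Int.add_emod, Int.emod_emod_of_dvd _ dvd_rfl,
    ← Int.add_emod]

lemma applyZ_update (ds δs : List Int) (i δ : Int)
    (hlen : δs.length = ds.length) (h0 : 0 ≤ i) (h1 : i < (ds.length : Int)) :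
    PySem.List.pySetD (applyZ ds δs) i
      (PySem.Int.mod (PySem.List.pyGetD (applyZ ds δs) i 0 + δ) 10)
    = applyZ ds (PySem.List.pySetD δs i (PySem.List.pyGetD δs i 0 + δ)) := by
  have hlA : (applyZ ds δs).length = ds.length := applyZ_length ds δs hlen
  rw [PySem.List.pySetD_of_nonneg _ _ h0, PySem.List.pySetD_of_nonneg _ _ h0,
    PySem.List.pyGetD_eq_getElem _ _ h0 (by rw [hlA]; exact h1),
    PySem.List.pyGetD_eq_getElem _ _ h0 (by rw [hlen]; exact h1)]
  apply List.ext_getElem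
  · simp [applyZ, hlen]
  · intro k hk hk'
    have hkd : k < ds.length := by simpa [hlA] using hk
    have hkδ : k < δs.length := by omega
    have hg : ∀ (es : List Int) (hl : es.length = ds.length) (j : Nat) (hj : j < ds.length),
        (applyZ ds es)[j]'(by rw [applyZ_length ds es hl]; exact hj)
          = PySem.Int.mod (ds[j] + es[j]'(by omega)) 10 := by
      intro es hl j hj
      simp [applyZ]
    rw [List.getElem_set, hg (δs.set i.toNat (δs[i.toNat]'(by omega) + δ))
      (by simp [hlen]) k hkd, List.getElem_set]
    by_cases hki : i.toNat = k
    · subst hki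
      rw [if_pos rfl, if_pos rfl, hg δs hlen i.toNat (by omega)]
      rw [PySem.Int.mod_eq_emod_of_pos (by norm_num : (0:Int) < 10),
        PySem.Int.mod_eq_emod_of_pos (by norm_num : (0:Int) < 10),
        PySem.Int.mod_eq_emod_of_pos (by norm_num : (0:Int) < 10)]
      omega
    · rw [if_neg hki, if_neg hki, hg δs hlen k hkd]

lemma pvSteps_R : pvSteps.getD 'R' 0 = 1 := by decide
lemma pvSteps_L : pvSteps.getD 'L' 0 = -1 := by decide
lemma pvSteps_other (c : Char) (hR : ¬ c = 'R') (hL : ¬ c = 'L') : pvSteps.getD c 0 = 0 := by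
  have h1 : ('R' == c) = false := by simpa [beq_iff_eq] using fun h => hR h.symm
  have h2 : ('L' == c) = false := by simpa [beq_iff_eq] using fun h => hL h.symm
  have hmk : pvSteps = PySem.Dict.mk [('R', 1), ('L', -1)] := by decide
  rw [hmk, PySem.Dict.getD_eq_get?_getD, PySem.Dict.get?_mk_cons, PySem.Dict.get?_mk_cons]
  simp [h1, h2, PySem.Dict.get?]

lemma step_comm (ds δs : List Int) (rl : Int) (c : Char)
    (hn : 0 < ds.length) (hlen : δs.length = ds.length) :
    solveLockStepA (applyZ ds δs, PySem.Int.mod rl (ds.length : Int)) c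
      = (applyZ ds (fusedStep (ds.length : Int) (δs, rl) c).1,
         PySem.Int.mod (fusedStep (ds.length : Int) (δs, rl) c).2 (ds.length : Int)) := by
  have hnz : (0 : Int) < (ds.length : Int) := by exact_mod_cast hn
  have hlA : (applyZ ds δs).length = ds.length := applyZ_length ds δs hlen
  have hm0 : 0 ≤ PySem.Int.mod rl (ds.length : Int) := PySem.Int.mod_nonneg _ hnz
  have hm1 : PySem.Int.mod rl (ds.length : Int) < (ds.length : Int) := PySem.Int.mod_lt _ hnz
  unfold solveLockStepA fusedStep solveLockPass2
  by_cases hR : c = 'R'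
  · subst hR
    simp only [Char.reduceEq, reduceIte, pvSteps_R]
    rw [hlA, mod_mod_add rl 1 _ hnz]
  by_cases hL : c = 'L'
  · subst hL
    simp only [Char.reduceEq, reduceIte, pvSteps_L]
    rw [hlA, sub_eq_add_neg, mod_mod_add rl (-1) _ hnz]
  by_cases hU : c = 'U'
  · subst hU
    simp only [Char.reduceEq, reduceIte, pvSteps_other 'U' (by decide) (by decide), add_zero]
    rw [applyZ_update ds δs _ 1 hlen hm0 hm1]
  by_cases hD : c = 'D'
  · subst hD
    simp only [Char.reduceEq, reduceIte, pvSteps_other 'D' (by decide) (by decide), add_zero,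
      sub_eq_add_neg]
    rw [applyZ_update ds δs _ (-1) hlen hm0 hm1]
  · simp only [hR, hL, hU, hD, if_false, pvSteps_other c hR hL, add_zero]

lemma length_pass2 (n : Int) (deltas : List Int) (pm : Int × Char) :
    (solveLockPass2 n deltas pm).length = deltas.length := by
  unfold solveLockPass2
  split_ifs <;> simp [PySem.List.length_pySetD]

lemma loop_inv (ds : List Int) (hn : 0 < ds.length) :
    ∀ (ms : List Char) (δs : List Int) (rl : Int), δs.length = ds.length →
      ms.foldl solveLockStepA (applyZ ds δs, PySem.Int.mod rl (ds.length : Int))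
        = (applyZ ds ((ms.foldl (fusedStep (ds.length : Int)) (δs, rl)).1),
           PySem.Int.mod ((ms.foldl (fusedStep (ds.length : Int)) (δs, rl)).2)
             (ds.length : Int)) := by
  intro ms
  induction ms with
  | nil => intro δs rl _; rfl
  | cons c ms ih =>
    intro δs rl hlen
    simp only [List.foldl_cons]
    rw [step_comm ds δs rl c hn hlen]
    exact ih _ _ (by rw [show (fusedStep (ds.length : Int) (δs, rl) c).1
      = solveLockPass2 (ds.length : Int) δs (rl, c) from rfl, length_pass2, hlen])

lemma applyZ_zero (ds : List Int) (hd : ∀ d ∈ ds, 0 ≤ d ∧ d < 10) :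
    applyZ ds (List.replicate ds.length 0) = ds := by
  apply List.ext_getElem
  · simp [applyZ]
  · intro k hk hk'
    have hb := hd ds[k] (List.getElem_mem hk')
    simp only [applyZ, List.getElem_map, List.getElem_zip, List.getElem_replicate, add_zero]
    rw [PySem.Int.mod_eq_emod_of_pos (by norm_num : (0:Int) < 10)]
    omega

lemma foldl_fixed {σ : Type} (f : σ → Char → σ) :
    ∀ (ms : List Char) (st : σ), (∀ c ∈ ms, ∀ s, f s c = s) → ms.foldl f st = st := by
  intro ms
  induction ms with
  | nil => intro st _; rfl
  | cons c ms ih =>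
    intro st h
    simp only [List.foldl_cons, h c (by simp)]
    exact ih st (fun c' hc' => h c' (by simp [hc']))

lemma pass2_nil (n : Int) (pm : Int × Char) : solveLockPass2 n [] pm = [] := by
  unfold solveLockPass2
  split_ifs <;>
    first
      | rfl
      | (simp only [PySem.List.pySetD, PySem.List.pySet?]
         cases h : PySem.List.pyIdx? 0 (PySem.Int.mod pm.1 n) <;> simp [h])

lemma foldl_pass2_nil (n : Int) : ∀ (l : List (Int × Char)),
    l.foldl (solveLockPass2 n) [] = [] := by
  intro l
  induction l with
  | nil => rfl
  | cons pm l ih => simp only [List.foldl_cons, pass2_nil]; exact ih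

lemma digit_val_bounds (c : Char) (h1 : 48 ≤ c.toNat) (h2 : c.toNat ≤ 57) :
    0 ≤ (PySem.Int.ofChars? [c]).getD 0 ∧ (PySem.Int.ofChars? [c]).getD 0 < 10 := by
  have hc : c = Char.ofNat c.toNat := by simp [Char.ofNat_toNat]
  interval_cases h : c.toNat <;> rw [hc] <;> decide

-- ===== VERDICT (by name: the statement is the Claim_ definition above) =====
theorem solve_lock_spec : Claim_equal_solve_lock := by
  intro i m _hdom hpre
  unfold Spec_solve_lock solve_lock solve_lock_alt
  dsimp only
  by_cases hi : i = ""
  · rcases hpre.2 with h | h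
    · exact absurd hi h
    · have hm : ∀ c ∈ m.toList, c ≠ 'R' ∧ c ≠ 'L' ∧ c ≠ 'U' ∧ c ≠ 'D' := by
        intro c hc
        have := List.all_eq_true.1 h c hc
        simp_all
      subst hi
      have hds : pvDigitsOf "" = [] := rfl
      simp only [hds, List.length_nil, List.replicate_zero]
      rw [foldl_fixed solveLockStepA m.toList ([], 0) (by
        intro c hc s
        have := hm c hc
        unfold solveLockStepA
        simp [this.1, this.2.1, this.2.2.1, this.2.2.2])]
      rw [foldl_pass2_nil]
      rfl
  · have hlen : 0 < (pvDigitsOf i).length := by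
      unfold pvDigitsOf
      simp only [List.length_map]
      have hnil : i.toList ≠ [] := by simpa using hi
      exact List.length_pos_iff.mpr hnil
    have hdig : ∀ d ∈ pvDigitsOf i, 0 ≤ d ∧ d < 10 := by
      intro d hdm
      unfold pvDigitsOf at hdm
      rcases List.mem_map.1 hdm with ⟨c, hc, rfl⟩
      have hb := List.all_eq_true.1 hpre.1 c hc
      simp only [Bool.and_eq_true, decide_eq_true_eq] at hb
      exact digit_val_bounds c hb.1 hb.2
    rw [pass1_fst m.toList [] 0, List.nil_append,
      fuse ((pvDigitsOf i).length : Int) m.toList _ 0]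
    have h0 : PySem.Int.mod 0 ((pvDigitsOf i).length : Int) = 0 := by
      rw [PySem.Int.mod_eq_emod_of_pos (by exact_mod_cast hlen), Int.zero_emod]
    have hstart := loop_inv (pvDigitsOf i) hlen m.toList
      (List.replicate (pvDigitsOf i).length 0) 0 (by simp)
    conv_lhs => rw [show (pvDigitsOf i, (0 : Int))
      = (applyZ (pvDigitsOf i) (List.replicate (pvDigitsOf i).length 0),
         PySem.Int.mod 0 ((pvDigitsOf i).length : Int)) from by
        rw [applyZ_zero _ hdig, h0]]
    rw [hstart]
    simp [applyZ, List.map_map, Function.comp_def]
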